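-- pv_equiv track=rewrite | github.com/sp00nznet/burnout3 | tools/abi_analysis/analyzer.py | _detect_preserved_registers
-- ===== SOURCE A (Python) =====
-- def _detect_preserved_registers(prologue, epilogue):
--     """Detect which callee-saved registers are preserved."""
--     preserved = []
--
--     # Standard callee-saved: EBX, ESI, EDI, EBP
--     # Look for push/pop patterns
--     push_regs = {0x53: "ebx", 0x56: "esi", 0x57: "edi", 0x55: "ebp"}
--
--     for i in range(min(len(prologue), 8)):
--         b = prologue[i]
--         if b in push_regs:
--             preserved.append(push_regs[b])
--         elif b not in (0x8B, 0x83, 0x81, 0x89, 0x50, 0x51, 0x52):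
--             # Stop at first non-push/non-standard instruction
--             break
--
--     return preserved
-- ===== SOURCE B (Python) =====
-- from functools import reduce
--
--
-- def _detect_preserved_registers(prologue, epilogue):
--     """Detect which callee-saved registers are preserved."""
--     push_regs = {0x53: "ebx", 0x56: "esi", 0x57: "edi", 0x55: "ebp"}
--     cont = (0x8B, 0x83, 0x81, 0x89, 0x50, 0x51, 0x52)
--
--     def step(b, suffix):
--         if b in push_regs:
--             return [push_regs[b]] + suffix
--         if b in cont:
--             return suffix
--         return []  # a stop byte discards everything decoded after it
--
--     # right fold over the 8-byte window: traverse back-to-front; the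
--     # forward loop's "break" becomes "reset the accumulated suffix".
--     return reduce(lambda acc, b: step(b, acc), reversed(prologue[:8]), [])
-- ===== Notes on version B (the rewrite author's own statement) =====
-- stated objective: alternative
-- what changed: Replaced the forward index loop with append/break by a right fold over the reversed 8-byte window: a stop byte resets the accumulated suffix to [], a push byte prepends its register name, so the break semantics arise from discarding instead of early exit.
import Mathlib
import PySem

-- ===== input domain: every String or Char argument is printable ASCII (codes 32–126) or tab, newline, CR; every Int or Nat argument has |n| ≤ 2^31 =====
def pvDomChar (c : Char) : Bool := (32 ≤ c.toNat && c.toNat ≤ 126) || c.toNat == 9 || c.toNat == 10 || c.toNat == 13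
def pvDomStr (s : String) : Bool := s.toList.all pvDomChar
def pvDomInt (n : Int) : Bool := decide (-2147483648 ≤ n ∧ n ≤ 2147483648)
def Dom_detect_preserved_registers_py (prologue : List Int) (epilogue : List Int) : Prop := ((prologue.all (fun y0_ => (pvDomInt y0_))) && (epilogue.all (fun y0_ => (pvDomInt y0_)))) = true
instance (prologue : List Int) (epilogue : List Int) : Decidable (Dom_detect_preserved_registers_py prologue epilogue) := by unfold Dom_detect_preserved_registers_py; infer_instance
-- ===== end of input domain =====

-- B replaces A's forward append/break loop by a right fold over the reversed 8-byte window (stop byte resets the suffix); same cost, different traversal.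


-- ===== PORT A =====
-- A's loop: for i in range(min(len(prologue), 8)) with append / break, transcribed as
-- fuel-8 recursion over the list carrying the accumulator.
def pvALoop : List Int → Nat → List String → List String
  | _, 0, acc => acc
  | [], _ + 1, acc => acc
  | b :: rest, n + 1, acc =>
    if b = 0x53 then pvALoop rest n (acc ++ ["ebx"])
    else if b = 0x56 then pvALoop rest n (acc ++ ["esi"])
    else if b = 0x57 then pvALoop rest n (acc ++ ["edi"])
    else if b = 0x55 then pvALoop rest n (acc ++ ["ebp"])
    else if b = 0x8B ∨ b = 0x83 ∨ b = 0x81 ∨ b = 0x89 ∨ b = 0x50 ∨ b = 0x51 ∨ b = 0x52 then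
      pvALoop rest n acc
    else acc

def detect_preserved_registers_py (prologue : List Int) (epilogue : List Int) : List String :=
  pvALoop prologue 8 []

-- ===== PORT B =====
-- push_regs lookup: push_regs.get(b)
def pvPushName? (b : Int) : Option String :=
  if b = 0x53 then some "ebx"
  else if b = 0x56 then some "esi"
  else if b = 0x57 then some "edi"
  else if b = 0x55 then some "ebp"
  else none

-- membership in the standard-continue tuple
def pvContByte (b : Int) : Bool :=
  b == 0x8B || b == 0x83 || b == 0x81 || b == 0x89 || b == 0x50 || b == 0x51 || b == 0x52

-- Source B's step: push prepends its name, a continue byte passes the suffix through, a stop byte discards it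
def pvStep (b : Int) (suffix : List String) : List String :=
  match pvPushName? b with
  | some name => name :: suffix
  | none => if pvContByte b then suffix else []

-- reduce(lambda acc, b: step(b, acc), reversed(prologue[:8]), []) = right fold of pvStep over the window
def detect_preserved_registers_py_alt (prologue : List Int) (epilogue : List Int) : List String :=
  (prologue.take 8).reverse.foldl (fun acc b => pvStep b acc) []

-- ===== PRECONDITION & SPEC =====
def Spec_detect_preserved_registers_py (prologue : List Int) (epilogue : List Int) (out : List String) : Prop := out = detect_preserved_registers_py_alt prologue epilogue
instance (prologue : List Int) (epilogue : List Int) (out : List String) : Decidable (Spec_detect_preserved_registers_py prologue epilogue out) := by unfold Spec_detect_preserved_registers_py; infer_instance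

-- ===== CLAIM (what is proved, stated in full; the proofs are below) =====
def Claim_equal_detect_preserved_registers_py : Prop := ∀ (prologue : List Int) (epilogue : List Int), Dom_detect_preserved_registers_py prologue epilogue → Spec_detect_preserved_registers_py prologue epilogue (detect_preserved_registers_py prologue epilogue)

-- ===== LEMMAS AND PROOFS =====
-- B's reversed-foldl is the right fold of pvStep
theorem pvAlt_eq_foldr (l : List Int) :
    l.reverse.foldl (fun acc b => pvStep b acc) [] = l.foldr pvStep [] := by
  simp [List.foldl_reverse]

-- A's break loop computes acc ++ the right fold over the taken window
theorem pvALoop_eq (l : List Int) : ∀ (n : Nat) (acc : List String),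
    pvALoop l n acc = acc ++ (l.take n).foldr pvStep [] := by
  induction l with
  | nil => intro n acc; cases n <;> simp [pvALoop]
  | cons b rest ih =>
    intro n acc
    cases n with
    | zero => simp [pvALoop]
    | succ n =>
      simp only [pvALoop, List.take_succ_cons, List.foldr_cons]
      by_cases h53 : b = 0x53
      · simp [h53, ih, pvStep, pvPushName?]
      by_cases h56 : b = 0x56
      · simp [h56, ih, pvStep, pvPushName?]
      by_cases h57 : b = 0x57
      · simp [h57, ih, pvStep, pvPushName?]
      by_cases h55 : b = 0x55
      · simp [h55, ih, pvStep, pvPushName?]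
      by_cases hc : b = 0x8B ∨ b = 0x83 ∨ b = 0x81 ∨ b = 0x89 ∨ b = 0x50 ∨ b = 0x51 ∨ b = 0x52
      · have hcb : pvContByte b = true := by
          rcases hc with h | h | h | h | h | h | h <;> simp [pvContByte, h]
        simp [h53, h56, h57, h55, hc, ih, pvStep, pvPushName?, hcb]
      · have hcb : pvContByte b = false := by
          simp only [pvContByte, Bool.or_eq_false_iff, beq_eq_false_iff_ne]
          push_neg at hc
          tauto
        simp [h53, h56, h57, h55, hc, pvStep, pvPushName?, hcb]

-- ===== VERDICT (by name: the statement is the Claim_ definition above) =====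
theorem detect_preserved_registers_py_spec : Claim_equal_detect_preserved_registers_py := by
  intro prologue epilogue _
  unfold Spec_detect_preserved_registers_py detect_preserved_registers_py detect_preserved_registers_py_alt
  rw [pvAlt_eq_foldr]
  simpa using pvALoop_eq prologue 8 []
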